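-- pv_equiv track=rewrite | github.com/v3DJG6GL/ha-bfe-rueckliefertarif | custom_components/bfe_rueckliefertarif/config_flow.py | _format_rate_window_dates
-- ===== SOURCE A (Python) =====
-- def _format_rate_window_dates(dates: list[str]) -> list[str]:
--     """Group rate-window valid_from dates by year.
--
--     - Single window per year → ``"2026"``
--     - Multiple windows per year → all full dates (``"2026-01-01"``, ``"2026-07-01"``)
--
--     Returns a list of display strings, one per year, in chronological order
--     of the year (newest first when input dates are descending; otherwise
--     by year value).
--     """
--     if not dates:
--         return []
--     by_year: dict[str, list[str]] = {}
--     for d in dates: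
--         if not isinstance(d, str) or len(d) < 4:
--             continue
--         year = d[:4]
--         by_year.setdefault(year, []).append(d)
--     out: list[str] = []
--     for year in sorted(by_year.keys(), reverse=True):
--         windows = by_year[year]
--         if len(windows) == 1:
--             out.append(year)
--         else:
--             for w in sorted(windows):
--                 out.append(w)
--     return out
-- ===== SOURCE B (Python) =====
-- from itertools import groupby
--
--
-- def _format_rate_window_dates(dates: list[str]) -> list[str]:
--     valid = sorted(d for d in dates if isinstance(d, str) and len(d) >= 4)
--     groups = [(y, list(g)) for y, g in groupby(valid, key=lambda d: d[:4])]
--     out: list[str] = []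
--     for y, g in reversed(groups):
--         out += [y] if len(g) == 1 else g
--     return out
-- ===== Notes on version B (the rewrite author's own statement) =====
-- stated objective: alternative
-- what changed: Replaces A's dict-of-lists accumulation (setdefault/append, then a key sort and per-year inner sorts) by one global sort of the valid dates followed by an itertools.groupby pass over consecutive year prefixes, emitting the groups in reverse.
import Mathlib
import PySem

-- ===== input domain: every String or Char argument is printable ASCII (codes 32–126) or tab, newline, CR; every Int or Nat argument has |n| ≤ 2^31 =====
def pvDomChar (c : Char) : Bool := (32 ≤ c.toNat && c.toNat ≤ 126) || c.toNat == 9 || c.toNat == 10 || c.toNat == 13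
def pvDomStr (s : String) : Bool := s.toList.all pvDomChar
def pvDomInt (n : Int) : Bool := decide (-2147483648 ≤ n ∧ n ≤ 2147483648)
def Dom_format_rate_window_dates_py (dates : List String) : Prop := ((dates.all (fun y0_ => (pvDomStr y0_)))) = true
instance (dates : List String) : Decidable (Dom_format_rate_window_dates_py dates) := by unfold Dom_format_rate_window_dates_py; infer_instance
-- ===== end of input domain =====

-- B replaces A's dict-of-lists accumulation (then key sort + per-year sorts) by one global sort
-- followed by an itertools.groupby pass over consecutive year prefixes (objective: alternative).
-- The `isinstance(d, str)` guard of A is vacuous here: every element of `dates : List String` is a string.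

-- ===== PORT A =====
def format_rate_window_dates_py (dates : List String) : List String :=
  if dates = [] then []
  else
    let by_year : PySem.Dict String (List String) :=
      dates.foldl (fun d x =>
        if PySem.Str.len x < 4 then d
        else d.modify (PySem.Str.slice x none (some 4)) [] (· ++ [x])) PySem.Dict.empty
    (PySem.List.sorted by_year.keys (fun y => y) true).foldl (fun out year =>
      let windows := by_year.getD year []
      if windows.length == 1 then out ++ [year]
      else (PySem.List.sorted windows (fun w => w) false).foldl (fun o w => o ++ [w]) out) []

-- ===== PORT B =====
-- itertools.groupby(valid, key=lambda d: d[:4]) as (key, run) pairs over consecutive equal keys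
def pvGroupAdd (d : String) (gs : List (String × List String)) : List (String × List String) :=
  match gs with
  | [] => [(PySem.Str.slice d none (some 4), [d])]
  | (k, g) :: rest =>
    if PySem.Str.slice d none (some 4) == k then (k, d :: g) :: rest
    else (PySem.Str.slice d none (some 4), [d]) :: (k, g) :: rest

def pvGroupBy : List String → List (String × List String)
  | [] => []
  | d :: t => pvGroupAdd d (pvGroupBy t)

def format_rate_window_dates_py_alt (dates : List String) : List String :=
  let valid := PySem.List.sorted (dates.filter (fun d => decide (4 ≤ PySem.Str.len d)))
    (fun w => w) false
  ((pvGroupBy valid).reverse).foldl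
    (fun out p => out ++ (if p.2.length == 1 then [p.1] else p.2)) []

-- ===== PRECONDITION & SPEC =====
def Spec_format_rate_window_dates_py (dates : List String) (out : List String) : Prop := out = format_rate_window_dates_py_alt dates
instance (dates : List String) (out : List String) : Decidable (Spec_format_rate_window_dates_py dates out) := by unfold Spec_format_rate_window_dates_py; infer_instance

-- ===== CLAIM (what is proved, stated in full; the proofs are below) =====
def Claim_equal_format_rate_window_dates_py : Prop := ∀ (dates : List String), Dom_format_rate_window_dates_py dates → Spec_format_rate_window_dates_py dates (format_rate_window_dates_py dates)

-- ===== LEMMAS AND PROOFS =====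

-- the year prefix d[:4]
def pvKey (d : String) : String := PySem.Str.slice d none (some 4)

-- the canonical value both programs compute: for each distinct year prefix, descending,
-- the year alone (single window) or the ascending-sorted windows of that year
def pvRender (valid : List String) (y : String) : List String :=
  if ((PySem.List.sorted (valid.filter (fun d => pvKey d == y)) (fun w => w) false).length == 1)
  then [y]
  else PySem.List.sorted (valid.filter (fun d => pvKey d == y)) (fun w => w) false

def pvCanon (dates : List String) : List String :=
  (PySem.List.sorted
      (PySem.Set.ofList ((dates.filter (fun d => decide (4 ≤ PySem.Str.len d))).map pvKey))
      (fun y => y) true).flatMap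
    (pvRender (dates.filter (fun d => decide (4 ≤ PySem.Str.len d))))

-- A's 'continue' loop: skipping the guarded elements is folding over the filtered list.
theorem pv_foldl_skip {α β : Type} (c : β → Prop) [DecidablePred c] (f : α → β → α)
    (l : List β) (i : α) :
    l.foldl (fun a x => if c x then a else f a x) i
      = (l.filter (fun x => !decide (c x))).foldl f i := by
  induction l generalizing i with
  | nil => rfl
  | cons x t ih =>
    by_cases h : c x <;> simp [List.filter, h, ih]

-- the dict built by A's loop: its lookup at y is the list of valid dates whose year prefix is y
theorem pv_getD_build (valid : List String) (y : String) :
    (valid.foldl (fun d x =>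
        d.modify (PySem.Str.slice x none (some 4)) [] (· ++ [x])) PySem.Dict.empty).getD y []
      = valid.filter (fun x => PySem.Str.slice x none (some 4) == y) := by
  have h := PySem.Dict.getD_foldl_modify_append
    (l := valid.map (fun x => (PySem.Str.slice x none (some 4), x)))
    (d := PySem.Dict.empty) (c := y)
  rw [List.foldl_map] at h
  simpa [List.filter_map, Function.comp_def] using h

theorem pv_A_canon (dates : List String) :
    format_rate_window_dates_py dates = pvCanon dates := by
  by_cases hnil : dates = []
  · subst hnil; rfl
  · simp only [format_rate_window_dates_py, pvCanon, if_neg hnil]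
    rw [pv_foldl_skip (c := fun x => PySem.Str.len x < 4)]
    have hpred : dates.filter (fun x => !decide (PySem.Str.len x < 4))
        = dates.filter (fun d => decide (4 ≤ PySem.Str.len d)) := by
      apply List.filter_congr
      intro x _
      simp only [← decide_not, not_lt]
    rw [hpred]
    set valid := dates.filter (fun d => decide (4 ≤ PySem.Str.len d)) with hv
    set D := valid.foldl (fun d x =>
      d.modify (PySem.Str.slice x none (some 4)) [] (· ++ [x])) PySem.Dict.empty with hD
    have hkeys : D.keys
        = PySem.Set.ofList (valid.map (fun d => PySem.Str.slice d none (some 4))) := by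
      rw [hD, PySem.Dict.keys_foldl_modify_key]
      simp [PySem.Set.update_nil_left]
    have hgetD : ∀ y, D.getD y []
        = valid.filter (fun d => PySem.Str.slice d none (some 4) == y) := by
      intro y; rw [hD]; exact pv_getD_build valid y
    rw [hkeys]
    have hb : ∀ (out : List String) (year : String),
        year ∈ PySem.List.sorted
          (PySem.Set.ofList (valid.map (fun d => PySem.Str.slice d none (some 4))))
          (fun y => y) true →
        (if ((D.getD year []).length == 1) then out ++ [year]
         else (PySem.List.sorted (D.getD year []) (fun w => w) false).foldl
            (fun o w => o ++ [w]) out)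
        = out ++ (if ((PySem.List.sorted
              (valid.filter (fun d => PySem.Str.slice d none (some 4) == year))
              (fun w => w) false).length == 1) then [year]
            else PySem.List.sorted
              (valid.filter (fun d => PySem.Str.slice d none (some 4) == year))
              (fun w => w) false) := by
      intro out year _
      rw [hgetD, PySem.List.foldl_append_singleton_eq_self, PySem.List.length_sorted]
      split <;> simp
    rw [PySem.List.foldl_congr_mem _ _ _ _ hb, PySem.List.foldl_append_eq_flatMap,
      List.nil_append]
    rfl

-- strict lexicographic comparison of n-prefixes implies comparison of the full lists
theorem pv_take_lt : ∀ (n : Nat) (u v : List Char),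
    List.Lex (· < ·) (u.take n) (v.take n) → List.Lex (· < ·) u v := by
  intro n
  induction n with
  | zero => intro u v h; simp only [List.take_zero] at h; cases h
  | succ n ih =>
    intro u v h
    match u, v with
    | [], [] => simp only [List.take_nil] at h; cases h
    | [], b :: vb => exact List.Lex.nil
    | a :: ua, [] => simp only [List.take_nil] at h; cases h
    | a :: ua, b :: vb =>
      simp only [List.take_succ_cons] at h
      cases h with
      | rel hr => exact List.Lex.rel hr
      | cons ht => exact List.Lex.cons (ih ua vb ht)

-- the year prefix is monotone in the string order
theorem pv_key_mono {a b : String} (hab : a ≤ b) : pvKey a ≤ pvKey b := by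
  have htake : ∀ s : String, (pvKey s).toList = s.toList.take 4 := by
    intro s
    simp only [pvKey, PySem.Str.toList_slice, PySem.Chars.slice_eq_listSlice]
    rw [PySem.List.slice_to s.toList (by norm_num : (0:Int) ≤ 4)]
    rfl
  by_contra hnle
  have hlt : pvKey b < pvKey a := lt_of_not_ge hnle
  rw [String.lt_iff_toList_lt, htake, htake] at hlt
  have hlex := (List.lt_iff_lex_lt (b.toList.take 4) (a.toList.take 4)).mp hlt
  have : b.toList < a.toList := (List.lt_iff_lex_lt _ _).mpr (pv_take_lt 4 _ _ hlex)
  exact absurd (String.lt_iff_toList_lt.mpr this) (not_lt_of_ge hab)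

theorem pv_ofList_sublist {α : Type} [BEq α] [LawfulBEq α] (xs : List α) :
    (PySem.Set.ofList xs).Sublist xs := by
  induction xs with
  | nil => simp [PySem.Set.ofList_nil]
  | cons x t ih =>
    rw [PySem.Set.ofList_cons]
    exact List.Sublist.cons₂ x
      (List.Sublist.trans
        (List.filter_sublist (p := fun y => !y == x) (l := PySem.Set.ofList t)) ih)

theorem pv_discard_of_not_mem {α : Type} [BEq α] [LawfulBEq α]
    {s : PySem.Set α} {x : α} (h : x ∉ s) : s.discard x = s := by
  simp only [PySem.Set.discard]
  rw [List.filter_eq_self]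
  intro y hy
  have hne : y ≠ x := fun he => h (he ▸ hy)
  simp [hne]

-- groupby of a list whose keys are weakly increasing: one group per distinct key, in
-- first-occurrence order, each group the sublist with that key
theorem pv_groupBy_eq : ∀ (l : List String),
    (l.map pvKey).Pairwise (· ≤ ·) →
    pvGroupBy l = (PySem.Set.ofList (l.map pvKey)).map
      (fun y => (y, l.filter (fun d => pvKey d == y))) := by
  intro l
  induction l with
  | nil => intro _; rfl
  | cons d t ih =>
    intro hp
    rw [List.map_cons] at hp
    have hpt : (t.map pvKey).Pairwise (· ≤ ·) := hp.of_cons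
    have hd : ∀ y ∈ t.map pvKey, pvKey d ≤ y := fun y hy => List.rel_of_pairwise_cons hp hy
    have ih' := ih hpt
    cases t with
    | nil =>
      simp [pvGroupBy, pvGroupAdd, pvKey, PySem.Set.ofList_cons, PySem.Set.ofList_nil,
        PySem.Set.discard]
    | cons e t' =>
      have hknotmem : pvKey d ≠ pvKey e → pvKey d ∉ (e :: t').map pvKey := by
        intro hne hmem
        rcases List.mem_map.mp hmem with ⟨x, hx, hxk⟩
        rcases List.mem_cons.mp hx with rfl | hx'
        · exact hne hxk.symm
        · have hpt' : (pvKey e :: t'.map pvKey).Pairwise (· ≤ ·) := by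
            rwa [List.map_cons] at hpt
          have h1 : pvKey e ≤ pvKey x :=
            List.rel_of_pairwise_cons hpt' (List.mem_map_of_mem hx')
          have h2 : pvKey d ≤ pvKey e := hd _ (by simp)
          exact hne (le_antisymm h2 (hxk ▸ h1))
      rw [List.map_cons] at ih' ⊢
      rw [PySem.Set.ofList_cons] at ih'
      rw [List.map_cons] at ih'
      show pvGroupAdd d (pvGroupBy (e :: t')) = _
      rw [ih', pvGroupAdd]
      by_cases hde : pvKey d = pvKey e
      · rw [if_pos (by simpa [pvKey] using hde)]
        rw [PySem.Set.ofList_cons]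
        rw [show PySem.Set.ofList (List.map pvKey (e :: t'))
            = pvKey e :: (PySem.Set.ofList (List.map pvKey t')).discard (pvKey e) from by
          rw [List.map_cons, PySem.Set.ofList_cons]]
        have hdd : PySem.Set.discard
              (pvKey e :: (PySem.Set.ofList (List.map pvKey t')).discard (pvKey e)) (pvKey d)
            = (PySem.Set.ofList (List.map pvKey t')).discard (pvKey e) := by
          rw [hde]
          simp [PySem.Set.discard, List.filter_filter]
        rw [hdd, List.map_cons]
        congr 1
        · rw [hde, List.filter_cons, List.filter_cons]
          simp
          exact hde
        · apply List.map_congr_left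
          intro y hy
          have hyne : y ≠ pvKey d := by
            have := (PySem.Set.mem_discard _ _ _).mp hy
            rw [hde]; exact this.2
          have hb : (pvKey d == y) = false := by simpa using fun h => hyne h.symm
          simp only [List.filter_cons, hb]
          simp
      · rw [if_neg (by simpa [pvKey] using hde)]
        have hnm : pvKey d ∉ PySem.Set.ofList (List.map pvKey (e :: t')) := by
          rw [PySem.Set.mem_ofList]
          exact hknotmem hde
        rw [PySem.Set.ofList_cons, pv_discard_of_not_mem hnm]
        rw [show PySem.Set.ofList (List.map pvKey (e :: t'))
            = pvKey e :: (PySem.Set.ofList (List.map pvKey t')).discard (pvKey e) from by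
          rw [List.map_cons, PySem.Set.ofList_cons]]
        rw [List.map_cons, List.map_cons]
        have hfilt : ∀ y, y ≠ pvKey d →
            (d :: e :: t').filter (fun x => pvKey x == y)
              = (e :: t').filter (fun x => pvKey x == y) := by
          intro y hy
          conv_lhs => rw [List.filter_cons]
          simp only [List.filter_cons]
          simp
          exact fun h => hy h.symm
        congr 1
        · have hnil : (e :: t').filter (fun x => pvKey x == pvKey d) = [] := by
            rw [List.filter_eq_nil_iff]
            intro x hx hbeq
            exact (hknotmem hde) (List.mem_map.mpr ⟨x, hx, (beq_iff_eq.mp hbeq)⟩)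
          conv_rhs => rw [List.filter_cons]
          rw [hnil]
          have hbs : (pvKey d == pvKey d) = true := by simp
          rw [if_pos hbs]
          rfl
        · refine congrArg₂ (· :: ·) ?_ ?_
          · have he : pvKey e ≠ pvKey d := fun h => hde h.symm
            have hf := hfilt _ he
            rw [hf]
          · apply List.map_congr_left
            intro y hy
            have hyne : y ≠ pvKey d := by
              intro h
              subst h
              have h1 := ((PySem.Set.mem_discard _ _ _).mp hy).1
              have h2 := (PySem.Set.mem_ofList _ _).mp h1
              exact hnm ((PySem.Set.mem_ofList _ _).mpr
                (by rw [List.map_cons]; exact List.mem_cons_of_mem _ h2))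
            have hf := hfilt y hyne
            rw [hf]

theorem pv_B_canon (dates : List String) :
    format_rate_window_dates_py_alt dates = pvCanon dates := by
  simp only [format_rate_window_dates_py_alt, pvCanon]
  set valid := dates.filter (fun d => decide (4 ≤ PySem.Str.len d)) with hv
  set sv := PySem.List.sorted valid (fun w => w) false with hsv
  have hsvp : sv.Pairwise (· ≤ ·) := by
    have := PySem.List.sorted_pairwise valid (fun w => w)
    simpa [hsv] using this
  have hp : (sv.map pvKey).Pairwise (· ≤ ·) := by
    rw [List.pairwise_map]
    exact hsvp.imp_of_mem (fun _ _ h => pv_key_mono h)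
  rw [PySem.List.foldl_append_eq_flatMap, List.nil_append]
  have hgb := pv_groupBy_eq sv hp
  simp only [pvKey] at hgb
  rw [hgb, ← List.map_reverse, List.flatMap_map]
  have hF1 : ∀ y, sv.filter (fun d => PySem.Str.slice d none (some 4) == y)
      = PySem.List.sorted (valid.filter (fun d => PySem.Str.slice d none (some 4) == y))
          (fun w => w) false := by
    intro y
    apply PySem.List.eq_of_perm_of_pairwise_le_of_injective (fun w => w) Function.injective_id
    · exact ((PySem.List.sorted_perm valid (fun w => w) false).filter _).trans
        (PySem.List.sorted_perm _ (fun w => w) false).symm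
    · exact List.Pairwise.sublist List.filter_sublist hsvp
    · exact PySem.List.sorted_pairwise _ (fun w => w)
  have hbody : (fun y => if ((sv.filter (fun d => PySem.Str.slice d none (some 4) == y)).length == 1)
        then [y] else sv.filter (fun d => PySem.Str.slice d none (some 4) == y))
      = pvRender valid := by
    funext y
    rw [hF1 y]
    simp only [pvRender, pvKey, PySem.List.length_sorted]
  have hrev : (PySem.Set.ofList (sv.map pvKey)).reverse
      = PySem.List.sorted (PySem.Set.ofList (valid.map pvKey)) (fun y => y) true := by
    symm
    apply PySem.List.sorted_rev_eq_of_perm_of_pairwise_gt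
    · apply (List.reverse_perm _).trans
      rw [List.perm_ext_iff_of_nodup (PySem.Set.nodup_ofList _) (PySem.Set.nodup_ofList _)]
      intro y
      simp only [PySem.Set.mem_ofList, List.mem_map]
      constructor
      · rintro ⟨x, hx, hxy⟩
        exact ⟨x, (PySem.List.mem_sorted _ _ _ _).mp hx, hxy⟩
      · rintro ⟨x, hx, hxy⟩
        exact ⟨x, (PySem.List.mem_sorted _ _ _ _).mpr hx, hxy⟩
    · rw [List.pairwise_reverse]
      have hle : (PySem.Set.ofList (sv.map pvKey)).Pairwise (· ≤ ·) :=
        List.Pairwise.sublist (pv_ofList_sublist _) hp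
      have hne : (PySem.Set.ofList (sv.map pvKey)).Pairwise (· ≠ ·) :=
        PySem.Set.nodup_ofList _
      exact (hle.and hne).imp (fun h => lt_of_le_of_ne h.1 h.2)
  rw [hbody, hrev]

theorem pv_main (dates : List String) :
    format_rate_window_dates_py dates = format_rate_window_dates_py_alt dates := by
  rw [pv_A_canon, pv_B_canon]

-- ===== VERDICT (by name: the statement is the Claim_ definition above) =====
theorem format_rate_window_dates_py_spec : Claim_equal_format_rate_window_dates_py := by
  intro dates _
  unfold Spec_format_rate_window_dates_py
  exact pv_main dates
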